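-- pv_equiv track=rewrite | github.com/PaddlePaddle/PaddleNLP | examples/text_to_knowledge/ernie-ctm/data.py | transfer_str_to_example
-- ===== SOURCE A (Python) =====
-- def transfer_str_to_example(sample):
--     text = ""
--     tags = []
--     items = sample.split(" ")
--     items = [item.rsplit("/", 1) for item in items]
--     for w, t in items:
--         text += w
--         if len(w) == 1:
--             tags.append(f"S-{t}")
--         else:
--             l = len(w)
--             for j in range(l):
--                 if j == 0:
--                     tags.append(f"B-{t}")
--                 elif j == l - 1:
--                     tags.append(f"E-{t}")
--                 else:
--                     tags.append(f"I-{t}")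
--     res = {
--         "tokens": list(text),
--         "tags": tags,
--     }
--     return res
-- ===== SOURCE B (Python) =====
-- def transfer_str_to_example(sample):
--     pairs = [item.rsplit("/", 1) for item in sample.split(" ")]
--     cells = [(c, i, t) for i, (w, t) in enumerate(pairs) for c in w]
--     ids = [i for _, i, _ in cells]
--     prev = [None] + ids[:-1]
--     nxt = ids[1:] + [None]
--     tags = []
--     for (c, i, t), p, q in zip(cells, prev, nxt):
--         first = p != i
--         last = q != i
--         pre = "S" if first and last else "B" if first else "E" if last else "I"
--         tags.append(f"{pre}-{t}")
--     return {"tokens": [c for c, _, _ in cells], "tags": tags}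
-- ===== Notes on version B (the rewrite author's own statement) =====
-- stated objective: alternative
-- what changed: Replaces A's per-word branching (S special case plus an index loop choosing B/E/I) by flattening the input into per-character cells tagged with their word id and deriving each prefix purely by comparing a cell's word id with its neighbours' (neighbour-comparison BIOES encoding over zipped shifted id lists).
import Mathlib
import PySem

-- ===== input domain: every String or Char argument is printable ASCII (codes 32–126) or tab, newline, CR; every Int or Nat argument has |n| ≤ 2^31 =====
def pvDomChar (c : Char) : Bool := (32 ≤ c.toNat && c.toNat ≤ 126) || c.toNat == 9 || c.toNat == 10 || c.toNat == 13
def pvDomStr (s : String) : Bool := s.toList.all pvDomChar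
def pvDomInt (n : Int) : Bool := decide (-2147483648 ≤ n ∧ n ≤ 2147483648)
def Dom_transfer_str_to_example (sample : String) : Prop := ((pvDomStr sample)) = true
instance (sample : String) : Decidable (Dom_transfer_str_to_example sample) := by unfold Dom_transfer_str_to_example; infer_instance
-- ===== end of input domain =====

-- B flattens the input into per-character cells carrying their word id and derives every
-- tag prefix by comparing a cell's word id with its neighbours' (neighbour-comparison
-- BIOES encoding), instead of A's per-word S special case and B/E/I index loop.

-- ===== PORT A =====
-- f"S-{t}" etc. (t is the tag's characters)
def pvMkTag (p : Char) (t : List Char) : String := String.mk (p :: '-' :: t)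

-- item.rsplit("/", 1) followed by unpacking into (w, t); none = the unpacking raises
-- ValueError (no '/' in item).  Exact: rsplit("/",1) = ["/".join(parts[:-1]), parts[-1]]
-- for parts = item.split("/") with at least two parts.
def pvRsplitSlash1? (item : List Char) : Option (List Char × List Char) :=
  match PySem.Chars.splitOn item ['/'] with
  | [] => none
  | [_] => none
  | p :: q :: rest =>
      some (PySem.Chars.join ['/'] ((p :: q :: rest).dropLast),
            (p :: q :: rest).getLast (by simp))

def transfer_str_to_example (sample : String) : List (String × List String) :=
  let items := PySem.Chars.splitOn sample.toList [' ']
  let pairs := items.map pvRsplitSlash1?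
  let st := pairs.foldl (fun (acc : List Char × List String) p =>
      match p with
      | none => acc  -- Python raises ValueError here; Pre_ excludes these inputs
      | some (w, t) =>
        let text := acc.1 ++ w
        let tags :=
          if w.length = 1 then acc.2 ++ [pvMkTag 'S' t]
          else
            (PySem.List.pyRange 0 (w.length : Int) 1).foldl (fun tags j =>
              if j = 0 then tags ++ [pvMkTag 'B' t]
              else if j = (w.length : Int) - 1 then tags ++ [pvMkTag 'E' t]
              else tags ++ [pvMkTag 'I' t]) acc.2
        (text, tags)) (([], []) : List Char × List String)
  [("tokens", st.1.map (fun c => String.mk [c])), ("tags", st.2)]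

-- ===== PORT B =====
def transfer_str_to_example_alt (sample : String) : List (String × List String) :=
  let pairs := (PySem.Chars.splitOn sample.toList [' ']).map pvRsplitSlash1?
  let cells : List (Char × Nat × List Char) :=
    (PySem.List.enumerate pairs).flatMap (fun ip => match ip.2 with
      | none => []  -- Python raises ValueError here; Pre_ excludes these inputs
      | some (w, t) => w.map (fun c => (c, ip.1.toNat, t)))
  let ids : List Nat := cells.map (fun x => x.2.1)
  let prev : List (Option Nat) := none :: ids.dropLast.map some
  let nxt : List (Option Nat) := ids.tail.map some ++ [none]
  let tags := (cells.zip (prev.zip nxt)).map (fun cpq =>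
    let i := cpq.1.2.1
    let first := cpq.2.1 ≠ some i
    let last := cpq.2.2 ≠ some i
    pvMkTag (if first ∧ last then 'S' else if first then 'B'
             else if last then 'E' else 'I') cpq.1.2.2)
  [("tokens", cells.map (fun x => String.mk [x.1])), ("tags", tags)]

-- ===== PRECONDITION & SPEC =====
-- Pre_ excludes exactly the inputs where some space-separated item has no '/', on which
-- Python A raises ValueError while unpacking item.rsplit("/", 1).
def Pre_transfer_str_to_example (sample : String) : Prop :=
  (PySem.Chars.splitOn sample.toList [' ']).all (PySem.Chars.isIn ['/']) = true
instance (sample : String) : Decidable (Pre_transfer_str_to_example sample) := by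
  unfold Pre_transfer_str_to_example; infer_instance
def pvWitness_transfer_str_to_example : String := "ab/X c/Y"

def Spec_transfer_str_to_example (sample : String) (out : List (String × List String)) : Prop := out = transfer_str_to_example_alt sample
instance (sample : String) (out : List (String × List String)) : Decidable (Spec_transfer_str_to_example sample out) := by unfold Spec_transfer_str_to_example; infer_instance

-- ===== CLAIM (what is proved, stated in full; the proofs are below) =====
def Claim_equal_transfer_str_to_example : Prop := ∀ (sample : String), Dom_transfer_str_to_example sample → Pre_transfer_str_to_example sample → Spec_transfer_str_to_example sample (transfer_str_to_example sample)

-- ===== LEMMAS AND PROOFS =====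

-- the common closed-form tag block of one (word, tag) pair, used only by the proofs
def pvTagBlock (w t : List Char) : List String :=
  if w.length = 1 then [pvMkTag 'S' t]
  else if 2 ≤ w.length then
    [pvMkTag 'B' t] ++ List.replicate (w.length - 2) (pvMkTag 'I' t) ++ [pvMkTag 'E' t]
  else []

theorem pvJoin_nil_cons (x : List Char) (xs : List (List Char)) :
    PySem.Chars.join [] (x :: xs) = x ++ PySem.Chars.join [] xs := by
  cases xs with
  | nil => simp [PySem.Chars.join_singleton, PySem.Chars.join_nil]
  | cons y r => simp [PySem.Chars.join_cons_cons]

-- ---------- A-side: A computes (join of words, flatMap of closed-form blocks) ----------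

theorem pvMapI (t : List Char) (m : Nat) :
    (PySem.List.pyRange 1 ((m : Int) + 1)).map (fun _ => pvMkTag 'I' t)
      = List.replicate m (pvMkTag 'I' t) := by
  induction m with
  | zero => simp [PySem.List.pyRange]
  | succ k ih =>
    have h2 : ((k + 1 : Nat) : Int) + 1 = ((k : Int) + 1) + 1 := by push_cast; ring
    rw [h2, PySem.List.pyRange_one_succ_right (by omega), List.map_append, ih]
    simp [List.replicate_succ']

theorem pvMapIE (t : List Char) (m : Nat) :
    (PySem.List.pyRange 1 ((m : Int) + 2)).map
        (fun j => if j = (m : Int) + 1 then pvMkTag 'E' t else pvMkTag 'I' t)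
      = List.replicate m (pvMkTag 'I' t) ++ [pvMkTag 'E' t] := by
  have h2 : ((m : Int) + 2) = ((m : Int) + 1) + 1 := by ring
  rw [h2, PySem.List.pyRange_one_succ_right (by omega), List.map_append]
  rw [List.map_congr_left (g := fun _ => pvMkTag 'I' t)
      (by
        intro j hj
        rw [PySem.List.mem_pyRange_one] at hj
        rw [if_neg (by omega)])]
  rw [pvMapI]
  simp

theorem pvRange_loop_eq (n : Nat) (t : List Char) (hn : n ≠ 1) (tags : List String) :
    (PySem.List.pyRange 0 (n : Int) 1).foldl (fun tags j =>
        if j = 0 then tags ++ [pvMkTag 'B' t]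
        else if j = (n : Int) - 1 then tags ++ [pvMkTag 'E' t]
        else tags ++ [pvMkTag 'I' t]) tags
      = tags ++ pvTagBlock (List.replicate n 'x') t := by
  match n, hn with
  | 0, _ => simp [pvTagBlock, PySem.List.pyRange]
  | (m+2), _ =>
    push_cast
    rw [PySem.List.pyRange_one_cons (by omega)]
    simp only [List.foldl_cons, zero_add]
    rw [PySem.List.foldl_congr_mem _ _
        (fun tags j => tags ++ [if j = (m : Int) + 2 - 1 then pvMkTag 'E' t
                                else pvMkTag 'I' t]) _
        (by
          intro acc x hx
          rw [PySem.List.mem_pyRange_one] at hx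
          rw [if_neg (by omega)]
          by_cases h : x = (m : Int) + 2 - 1 <;> simp [h])]
    rw [PySem.List.foldl_append_singleton_eq_map]
    have hc3 : (fun j => if j = (m : Int) + 2 - 1 then pvMkTag 'E' t else pvMkTag 'I' t)
        = (fun j => if j = (m : Int) + 1 then pvMkTag 'E' t else pvMkTag 'I' t) := by
      funext j
      rw [show (m : Int) + 2 - 1 = (m : Int) + 1 from by ring]
    rw [hc3, pvMapIE]
    simp [pvTagBlock, List.append_assoc]

theorem pvOuter_loop_eq (pairs : List (Option (List Char × List Char)))
    (text : List Char) (tags : List String) :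
    pairs.foldl (fun (acc : List Char × List String) p =>
      match p with
      | none => acc
      | some (w, t) =>
        let text := acc.1 ++ w
        let tags' :=
          if w.length = 1 then acc.2 ++ [pvMkTag 'S' t]
          else
            (PySem.List.pyRange 0 (w.length : Int) 1).foldl (fun tags j =>
              if j = 0 then tags ++ [pvMkTag 'B' t]
              else if j = (w.length : Int) - 1 then tags ++ [pvMkTag 'E' t]
              else tags ++ [pvMkTag 'I' t]) acc.2
        (text, tags')) (text, tags)
    = (text ++ PySem.Chars.join [] (pairs.map (fun p => (p.map Prod.fst).getD [])),
       tags ++ pairs.flatMap (fun p =>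
         match p with
         | none => []
         | some (w, t) => pvTagBlock w t)) := by
  induction pairs generalizing text tags with
  | nil => simp [PySem.Chars.join_nil]
  | cons p rest ih =>
    cases p with
    | none =>
      simp only [List.foldl_cons, List.map_cons, List.flatMap_cons, Option.map_none,
        Option.getD_none, pvJoin_nil_cons, List.nil_append]
      rw [ih]
    | some wt =>
      obtain ⟨w, t⟩ := wt
      simp only [List.foldl_cons, List.map_cons, List.flatMap_cons, Option.map_some,
        Option.getD_some, pvJoin_nil_cons]
      rw [ih]
      by_cases h1 : w.length = 1
      · simp [pvTagBlock, h1, List.append_assoc]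
      · have hb := pvRange_loop_eq w.length t h1 tags
        have hrep : pvTagBlock (List.replicate w.length 'x') t = pvTagBlock w t := by
          simp [pvTagBlock]
        rw [hrep] at hb
        simp only [if_neg h1, hb, List.append_assoc]

-- ---------- B-side: the neighbour-comparison pass computes the same flatMap ----------

-- recursive reading of B's zip-with-shifted-neighbours pass (prev state threaded)
def pvR (p : Option Nat) : List (Char × Nat × List Char) → List String
  | [] => []
  | cell :: rest =>
      let i := cell.2.1
      let q : Option Nat := rest.head?.map (fun x => x.2.1)
      pvMkTag (if (p ≠ some i) ∧ (q ≠ some i) then 'S' else if p ≠ some i then 'B'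
               else if q ≠ some i then 'E' else 'I') cell.2.2 :: pvR (some i) rest

theorem pvR_cons (p : Option Nat) (cell : Char × Nat × List Char)
    (rest : List (Char × Nat × List Char)) :
    pvR p (cell :: rest)
      = pvMkTag (if (p ≠ some cell.2.1) ∧ (rest.head?.map (fun x => x.2.1) ≠ some cell.2.1)
                 then 'S' else if p ≠ some cell.2.1 then 'B'
                 else if rest.head?.map (fun x => x.2.1) ≠ some cell.2.1 then 'E' else 'I')
          cell.2.2 :: pvR (some cell.2.1) rest := rfl

-- B's staged zip equals the recursive reading
theorem pvZip_eq_R (cells : List (Char × Nat × List Char)) (p : Option Nat) :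
    (cells.zip ((p :: (cells.map (fun x => x.2.1)).dropLast.map some).zip
        ((cells.map (fun x => x.2.1)).tail.map some ++ [none]))).map (fun cpq =>
      let i := cpq.1.2.1
      let first := cpq.2.1 ≠ some i
      let last := cpq.2.2 ≠ some i
      pvMkTag (if first ∧ last then 'S' else if first then 'B'
               else if last then 'E' else 'I') cpq.1.2.2)
    = pvR p cells := by
  induction cells generalizing p with
  | nil => simp [pvR]
  | cons c rest ih =>
    cases rest with
    | nil => simp [pvR]
    | cons r rs =>
      rw [pvR_cons, ← ih (some c.2.1)]
      simp [List.dropLast_cons₂]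

-- B's single-word tail segment: I everywhere, E on the last character
theorem pvR_inner (cs : List Char) (n : Nat) (t : List Char)
    (tail : List (Char × Nat × List Char)) (htail : ∀ x ∈ tail.head?, x.2.1 ≠ n)
    (hcs : cs ≠ []) :
    pvR (some n) (cs.map (fun c => (c, n, t)) ++ tail)
      = List.replicate (cs.length - 1) (pvMkTag 'I' t) ++ [pvMkTag 'E' t]
        ++ pvR (some n) tail := by
  induction cs with
  | nil => exact absurd rfl hcs
  | cons c cs' ih =>
    cases cs' with
    | nil =>
      have hq : (tail.head?.map (fun x => x.2.1)) ≠ some n := by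
        cases h : tail.head? with
        | none => simp
        | some x => simpa [h] using htail x (by simp [h])
      simp [pvR, hq]
    | cons c2 cs'' =>
      rw [List.map_cons, List.cons_append, pvR_cons]
      rw [ih (by simp)]
      simp [List.replicate_succ]

-- B's pass over one word block is that word's closed-form tag block
theorem pvR_block (w : List Char) (n : Nat) (t : List Char) (p : Option Nat)
    (tail : List (Char × Nat × List Char)) (hp : p ≠ some n)
    (htail : ∀ x ∈ tail.head?, x.2.1 ≠ n) :
    pvR p (w.map (fun c => (c, n, t)) ++ tail)
      = pvTagBlock w t ++ pvR (if w = [] then p else some n) tail := by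
  cases w with
  | nil => simp [pvTagBlock]
  | cons c cs =>
    cases cs with
    | nil =>
      have hq : (tail.head?.map (fun x => x.2.1)) ≠ some n := by
        cases h : tail.head? with
        | none => simp
        | some x => simpa [h] using htail x (by simp [h])
      simp [pvR, pvTagBlock, hp, hq]
    | cons c2 cs' =>
      rw [List.map_cons, List.cons_append, pvR_cons]
      rw [pvR_inner (c2 :: cs') n t tail htail (by simp)]
      simp [pvTagBlock, hp, List.append_assoc]

-- B's flattened cells from enumerate
def pvCells (pairs : List (Option (List Char × List Char))) (s : Int) :
    List (Char × Nat × List Char) :=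
  (PySem.List.enumerate pairs s).flatMap (fun ip => match ip.2 with
    | none => []
    | some (w, t) => w.map (fun c => (c, ip.1.toNat, t)))

theorem pvCells_ids_ge (pairs : List (Option (List Char × List Char))) (s : Nat) :
    ∀ x ∈ pvCells pairs (s : Int), s ≤ x.2.1 := by
  induction pairs generalizing s with
  | nil => simp [pvCells, PySem.List.enumerate_nil]
  | cons p rest ih =>
    intro x hx
    simp only [pvCells, PySem.List.enumerate_cons, List.flatMap_cons, List.mem_append] at hx
    rcases hx with hx | hx
    · cases p with
      | none => simp at hx
      | some wt =>
        obtain ⟨c, hc, rfl⟩ := List.mem_map.mp hx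
        simp
    · have := ih (s + 1) x (by
        simpa [pvCells, Int.natCast_add] using hx)
      omega

theorem pvR_cells (pairs : List (Option (List Char × List Char))) (s : Nat)
    (p : Option Nat) (hp : ∀ j, p = some j → j < s) :
    pvR p (pvCells pairs (s : Int))
      = pairs.flatMap (fun op => match op with
          | none => []
          | some (w, t) => pvTagBlock w t) := by
  induction pairs generalizing s p with
  | nil => simp [pvCells, PySem.List.enumerate_nil, pvR]
  | cons op rest ih =>
    have hrest : pvCells (op :: rest) (s : Int)
        = (match op with
            | none => []
            | some (w, t) => w.map (fun c => (c, ((s : Int)).toNat, t)))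
          ++ pvCells rest ((s : Int) + 1) := by
      simp [pvCells, PySem.List.enumerate_cons]
    have hcast : ((s : Int)) + 1 = ((s + 1 : Nat) : Int) := by push_cast; ring
    cases op with
    | none =>
      rw [hrest]
      simp only [List.nil_append, List.flatMap_cons]
      rw [hcast, ih (s + 1) p (fun j hj => by have := hp j hj; omega)]
    | some wt =>
      obtain ⟨w, t⟩ := wt
      rw [hrest, hcast]
      simp only [Int.toNat_natCast]
      have htail : ∀ x ∈ (pvCells rest ((s + 1 : Nat) : Int)).head?, x.2.1 ≠ s := by
        intro x hx
        have hmem : x ∈ pvCells rest ((s + 1 : Nat) : Int) := by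
          rw [List.eq_cons_of_mem_head? hx]
          exact List.mem_cons_self
        have := pvCells_ids_ge rest (s + 1) x hmem
        omega
      have hpne : p ≠ some s := fun h => by have := hp s h; omega
      rw [pvR_block w s t p _ hpne htail]
      simp only [List.flatMap_cons]
      congr 1
      split
      · exact ih (s + 1) p (fun j hj => by have := hp j hj; omega)
      · exact ih (s + 1) (some s) (fun j hj => by cases hj; omega)

-- B's tokens are the concatenation of the words
theorem pvCells_tokens (pairs : List (Option (List Char × List Char))) (s : Int) :
    (pvCells pairs s).map (fun x => x.1)
      = PySem.Chars.join [] (pairs.map (fun p => (p.map Prod.fst).getD [])) := by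
  induction pairs generalizing s with
  | nil => simp [pvCells, PySem.List.enumerate_nil, PySem.Chars.join_nil]
  | cons op rest ih =>
    cases op with
    | none =>
      simp only [pvCells, PySem.List.enumerate_cons, List.flatMap_cons, List.map_cons,
        Option.map_none, Option.getD_none, pvJoin_nil_cons, List.nil_append]
      exact ih (s + 1)
    | some wt =>
      obtain ⟨w, t⟩ := wt
      simp only [pvCells, PySem.List.enumerate_cons, List.flatMap_cons, List.map_cons,
        Option.map_some, Option.getD_some, pvJoin_nil_cons, List.map_append, List.map_map]
      rw [show ((fun x => x.1) ∘ fun c => (c, s.toNat, t)) = id from rfl]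
      simp only [List.map_id]
      congr 1
      exact ih (s + 1)

-- ===== VERDICT (by name: the statement is the Claim_ definition above) =====
theorem transfer_str_to_example_spec : Claim_equal_transfer_str_to_example := by
  intro sample _ _
  unfold Spec_transfer_str_to_example transfer_str_to_example transfer_str_to_example_alt
  simp only []
  rw [pvOuter_loop_eq]
  have hc : (PySem.List.enumerate ((PySem.Chars.splitOn sample.toList [' ']).map pvRsplitSlash1?)).flatMap
      (fun ip => match ip.2 with
        | none => []
        | some (w, t) => w.map (fun c => (c, ip.1.toNat, t)))
      = pvCells ((PySem.Chars.splitOn sample.toList [' ']).map pvRsplitSlash1?) 0 := rfl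
  rw [hc, pvZip_eq_R, show ((0 : Int)) = ((0 : Nat) : Int) from rfl,
    pvR_cells _ 0 none (by simp)]
  rw [show (fun (x : Char × Nat × List Char) => String.mk [x.1])
        = ((fun c => String.mk [c]) ∘ (fun x => x.1)) from rfl, ← List.map_map,
    pvCells_tokens]
  simp
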